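-- pv_equiv track=rewrite | github.com/deduu/MCP-Tuna | src/agentsoul/providers/google.py | _extract_system
-- ===== SOURCE A (Python) =====
-- from typing import Any, AsyncGenerator, Dict, Iterable, List, Optional
--
-- def _extract_system(messages: Iterable[Dict[str, Any]]) -> tuple[str | None, list[Dict[str, Any]]]:
--     """Separate system message (Gemini takes system_instruction as config)."""
--     system: str | None = None
--     filtered: list[Dict[str, Any]] = []
--     for m in messages:
--         if hasattr(m, "to_dict"):
--             m = m.to_dict()
--         if m.get("role") == "system":
--             system = m.get("content", "")
--         else:
--             filtered.append(m)
--     return system, filtered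
-- ===== SOURCE B (Python) =====
-- def _extract_system(messages):
--     """Separate system message (Gemini takes system_instruction as config)."""
--     norm = [m.to_dict() if hasattr(m, "to_dict") else m for m in messages]
--     filtered = [m for m in norm if m.get("role") != "system"]
--     system = next((m.get("content", "") for m in reversed(norm)
--                    if m.get("role") == "system"), None)
--     return system, filtered
-- ===== Notes on version B (the rewrite author's own statement) =====
-- stated objective: alternative
-- what changed: Replaces the single fused accumulator loop (mutable system variable + append) by two independent passes over a normalized list: a filter comprehension for non-system messages and a reversed-scan next(...) that picks the last system message's content.
import Mathlib
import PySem

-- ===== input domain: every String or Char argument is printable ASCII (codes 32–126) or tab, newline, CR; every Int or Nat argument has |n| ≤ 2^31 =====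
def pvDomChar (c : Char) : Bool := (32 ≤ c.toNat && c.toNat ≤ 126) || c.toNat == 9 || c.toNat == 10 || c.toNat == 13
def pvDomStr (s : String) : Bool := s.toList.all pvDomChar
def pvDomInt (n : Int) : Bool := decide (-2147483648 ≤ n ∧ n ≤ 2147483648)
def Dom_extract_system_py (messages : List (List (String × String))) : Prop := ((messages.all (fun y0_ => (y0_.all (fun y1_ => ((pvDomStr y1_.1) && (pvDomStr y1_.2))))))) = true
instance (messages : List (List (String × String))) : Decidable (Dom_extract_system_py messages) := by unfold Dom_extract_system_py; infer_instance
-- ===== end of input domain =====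

-- B separates A's fused accumulator loop into two independent passes (filter + reversed-scan pick); alternative decomposition, same cost.

-- ===== PORT A =====
-- one loop, mutable (system, filtered) state; `m.get("role") == "system"`, last system wins
def extract_system_py (messages : List (List (String × String))) : Option String × (List (List (String × String))) :=
  messages.foldl
    (fun st m =>
      if (PySem.Dict.mk m).get? "role" == some "system" then
        (some ((PySem.Dict.mk m).getD "content" ""), st.2)
      else
        (st.1, st.2 ++ [m]))
    (none, [])

-- ===== PORT B =====
-- two passes: filter out system messages; find last system message (scan of the reverse) and take its content
def extract_system_py_alt (messages : List (List (String × String))) : Option String × (List (List (String × String))) :=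
  let filtered := messages.filter (fun m => !((PySem.Dict.mk m).get? "role" == some "system"))
  let system := (messages.reverse.find? (fun m => (PySem.Dict.mk m).get? "role" == some "system")).map
      (fun m => (PySem.Dict.mk m).getD "content" "")
  (system, filtered)

-- ===== PRECONDITION & SPEC =====
def Spec_extract_system_py (messages : List (List (String × String))) (out : Option String × (List (List (String × String)))) : Prop := out = extract_system_py_alt messages
instance (messages : List (List (String × String))) (out : Option String × (List (List (String × String)))) : Decidable (Spec_extract_system_py messages out) := by unfold Spec_extract_system_py; infer_instance

-- ===== CLAIM (what is proved, stated in full; the proofs are below) =====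
def Claim_equal_extract_system_py : Prop := ∀ (messages : List (List (String × String))), Dom_extract_system_py messages → Spec_extract_system_py messages (extract_system_py messages)

-- ===== LEMMAS AND PROOFS =====

-- loop invariant: A's fold from an arbitrary state equals B's two passes merged into that state
theorem pv_loop_eq (ms : List (List (String × String))) (s : Option String)
    (acc : List (List (String × String))) :
    ms.foldl
      (fun st m =>
        if (PySem.Dict.mk m).get? "role" == some "system" then
          (some ((PySem.Dict.mk m).getD "content" ""), st.2)
        else
          (st.1, st.2 ++ [m]))
      (s, acc)
    = ((ms.reverse.find? (fun m => (PySem.Dict.mk m).get? "role" == some "system")).elim s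
          (fun m => some ((PySem.Dict.mk m).getD "content" "")),
       acc ++ ms.filter (fun m => !((PySem.Dict.mk m).get? "role" == some "system"))) := by
  induction ms generalizing s acc with
  | nil => simp
  | cons x xs ih =>
    simp only [List.foldl_cons, List.reverse_cons, List.find?_append, List.filter_cons]
    by_cases hx : ((PySem.Dict.mk x).get? "role" == some "system") = true
    · simp only [hx, if_pos, Bool.not_true]
      rw [ih]
      cases xs.reverse.find? (fun m => (PySem.Dict.mk m).get? "role" == some "system") with
      | none => simp [List.find?, hx]
      | some m => simp
    · simp only [hx, Bool.not_false]
      rw [ih]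
      cases xs.reverse.find? (fun m => (PySem.Dict.mk m).get? "role" == some "system") with
      | none => simp [List.find?, hx]
      | some m => simp

-- ===== VERDICT (by name: the statement is the Claim_ definition above) =====
theorem extract_system_py_spec : Claim_equal_extract_system_py := by
  intro messages _
  show _ = _
  rw [extract_system_py, extract_system_py_alt, pv_loop_eq]
  cases messages.reverse.find? (fun m => (PySem.Dict.mk m).get? "role" == some "system") <;> simp
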